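-- pv_equiv track=rewrite | github.com/EugeneMMF/leetcode | maximum-number-of-non-overlapping-subarrays-with-sum-equals-target.py | maxNonOverlapping
-- ===== SOURCE A (Python) =====
-- def maxNonOverlapping(nums, target):
--     s = 0
--     seen = {0}
--     count = 0
--     for x in nums:
--         s += x
--         if s - target in seen:
--             count += 1
--             s = 0
--             seen = {0}
--         else:
--             seen.add(s)
--     return count
-- ===== SOURCE B (Python) =====
-- def maxNonOverlapping(nums, target):
--     prefix = 0
--     dp = 0
--     best = {0: 0}  # prefix-sum value -> best count achievable at a position with that prefix sum
--     for x in nums: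
--         prefix += x
--         prev = best.get(prefix - target)
--         new_dp = dp if prev is None else max(dp, prev + 1)
--         best[prefix] = max(best.get(prefix, new_dp), new_dp)
--         dp = new_dp
--     return dp
-- ===== Notes on version B (the rewrite author's own statement) =====
-- stated objective: alternative
-- what changed: Replaced the greedy reset-the-seen-set scan by a dynamic program over global prefix sums that keeps a dict from each seen prefix-sum value to the best count achievable there and never resets state.
import Mathlib
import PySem

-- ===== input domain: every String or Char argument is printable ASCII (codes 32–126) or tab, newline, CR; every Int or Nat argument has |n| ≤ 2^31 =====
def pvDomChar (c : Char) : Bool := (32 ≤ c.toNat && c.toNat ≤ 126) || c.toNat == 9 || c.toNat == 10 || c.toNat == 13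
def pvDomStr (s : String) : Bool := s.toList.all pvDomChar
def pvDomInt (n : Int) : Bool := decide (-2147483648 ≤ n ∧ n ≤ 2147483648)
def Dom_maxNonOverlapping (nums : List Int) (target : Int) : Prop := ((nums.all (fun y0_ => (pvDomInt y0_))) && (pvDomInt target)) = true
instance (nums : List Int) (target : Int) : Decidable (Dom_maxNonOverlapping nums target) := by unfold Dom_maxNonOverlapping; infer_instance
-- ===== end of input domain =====

-- B replaces A's greedy reset-the-seen-set scan by a dynamic program over global prefix
-- sums (dict: prefix-sum value -> best count achievable there); proven to return A's value.

-- ===== PORT A =====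
-- one loop iteration of A: state (s, seen, count)
def stepA (target : Int) (st : Int × PySem.Set Int × Int) (x : Int) : Int × PySem.Set Int × Int :=
  let s := st.1 + x
  if s - target ∈ st.2.1 then (0, PySem.Set.ofList [0], st.2.2 + 1)
  else (s, PySem.Set.add st.2.1 s, st.2.2)

def maxNonOverlapping (nums : List Int) (target : Int) : Int :=
  (nums.foldl (stepA target) (0, PySem.Set.ofList [0], 0)).2.2

-- ===== PORT B =====
-- one loop iteration of B: state (prefix, dp, best)
def stepB (target : Int) (st : Int × Int × PySem.Dict Int Int) (x : Int) : Int × Int × PySem.Dict Int Int :=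
  let pfx := st.1 + x
  let dp := st.2.1
  let best := st.2.2
  let new_dp := match best.get? (pfx - target) with
    | none => dp
    | some prev => max dp (prev + 1)
  (pfx, new_dp, best.insert pfx (max (best.getD pfx new_dp) new_dp))

def maxNonOverlapping_alt (nums : List Int) (target : Int) : Int :=
  (nums.foldl (stepB target) (0, 0, (PySem.Dict.empty).insert 0 0)).2.1

-- ===== PRECONDITION & SPEC =====
def Spec_maxNonOverlapping (nums : List Int) (target : Int) (out : Int) : Prop := out = maxNonOverlapping_alt nums target
instance (nums : List Int) (target : Int) (out : Int) : Decidable (Spec_maxNonOverlapping nums target out) := by unfold Spec_maxNonOverlapping; infer_instance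

-- ===== CLAIM (what is proved, stated in full; the proofs are below) =====
def Claim_equal_maxNonOverlapping : Prop := ∀ (nums : List Int) (target : Int), Dom_maxNonOverlapping nums target → Spec_maxNonOverlapping nums target (maxNonOverlapping nums target)

-- ===== LEMMAS AND PROOFS =====

-- Bisimulation invariant: B's dp equals A's count, and a key of B's dict holds the current
-- count c exactly when it is a global prefix sum recorded (relative to the base P - s) in A's seen set.
lemma loop_eq (target : Int) : ∀ (nums : List Int) (s : Int) (seen : PySem.Set Int) (c P : Int)
    (best : PySem.Dict Int Int), 0 ≤ c →
    (∀ x : Int, best.getD x (-1) ≤ c ∧ (best.getD x (-1) = c ↔ (x - (P - s)) ∈ seen)) →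
    (nums.foldl (stepA target) (s, seen, c)).2.2 = (nums.foldl (stepB target) (P, c, best)).2.1 := by
  intro nums
  induction nums with
  | nil => intro s seen c P best hc hinv; simp
  | cons y ys ih =>
    intro s seen c P best hc hinv
    simp only [List.foldl_cons]
    by_cases hhit : (s + y - target) ∈ seen
    · -- A resets; B's lookup finds value c and new_dp = c + 1
      have hkey : best.getD (P + y - target) (-1) = c := by
        apply (hinv (P + y - target)).2.mpr
        have : P + y - target - (P - s) = s + y - target := by ring
        rw [this]; exact hhit
      have hget : best.get? (P + y - target) = some c := by
        rcases h : best.get? (P + y - target) with _ | v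
        · exfalso
          have := PySem.Dict.getD_of_get?_eq_none best (-1 : Int) h
          omega
        · have := PySem.Dict.getD_of_get?_eq_some best (-1 : Int) h
          rw [hkey] at this; rw [this]
      have hndp : (match best.get? (P + y - target) with
          | none => c | some prev => max c (prev + 1)) = c + 1 := by
        rw [hget]; show max c (c + 1) = c + 1; omega
      have hval : max (best.getD (P + y) (c + 1)) (c + 1) = c + 1 := by
        rcases h : best.get? (P + y) with _ | v
        · rw [PySem.Dict.getD_of_get?_eq_none best _ h]; omega
        · rw [PySem.Dict.getD_of_get?_eq_some best _ h]
          have := (hinv (P + y)).1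
          rw [PySem.Dict.getD_of_get?_eq_some best (-1 : Int) h] at this
          omega
      have hA : stepA target (s, seen, c) y = (0, PySem.Set.ofList [0], c + 1) := by
        simp only [stepA, hhit, if_pos]
      have hB : stepB target (P, c, best) y = (P + y, c + 1, best.insert (P + y) (c + 1)) := by
        simp only [stepB]; rw [hndp, hval]
      rw [hA, hB]
      apply ih 0 (PySem.Set.ofList [0]) (c + 1) (P + y) _ (by omega)
      intro x
      rw [PySem.Dict.getD_insert]
      by_cases hx : x = P + y
      · subst hx
        refine ⟨by simp, ?_⟩
        simp [PySem.Set.ofList]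
      · simp only [if_neg hx]
        have h1 := (hinv x).1
        constructor
        · omega
        · constructor
          · intro h; omega
          · intro hmem
            exfalso
            have : x - (P + y - 0) = 0 := by
              have : x - (P + y - 0) ∈ PySem.Set.ofList [(0 : Int)] := hmem
              simpa [PySem.Set.ofList] using this
            omega
    · -- no hit: A adds s+y to seen; B's new_dp stays c
      have hne : best.getD (P + y - target) (-1) ≠ c := by
        intro h
        exact hhit (by
          have := (hinv (P + y - target)).2.mp h
          have heq : P + y - target - (P - s) = s + y - target := by ring
          rwa [heq] at this)
      have hle := (hinv (P + y - target)).1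
      have hndp : (match best.get? (P + y - target) with
          | none => c | some prev => max c (prev + 1)) = c := by
        rcases h : best.get? (P + y - target) with _ | v
        · rfl
        · have hv := PySem.Dict.getD_of_get?_eq_some best (-1 : Int) h
          rw [hv] at hne hle
          show max c (v + 1) = c; omega
      have hval : max (best.getD (P + y) c) c = c := by
        rcases h : best.get? (P + y) with _ | v
        · rw [PySem.Dict.getD_of_get?_eq_none best _ h]; omega
        · rw [PySem.Dict.getD_of_get?_eq_some best _ h]
          have := (hinv (P + y)).1
          rw [PySem.Dict.getD_of_get?_eq_some best (-1 : Int) h] at this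
          omega
      have hA : stepA target (s, seen, c) y = (s + y, PySem.Set.add seen (s + y), c) := by
        simp only [stepA, hhit, if_neg, not_false_iff]
      have hB : stepB target (P, c, best) y = (P + y, c, best.insert (P + y) c) := by
        simp only [stepB]; rw [hndp, hval]
      rw [hA, hB]
      apply ih (s + y) (PySem.Set.add seen (s + y)) c (P + y) _ hc
      intro x
      rw [PySem.Dict.getD_insert]
      have hbase : P + y - (s + y) = P - s := by ring
      by_cases hx : x = P + y
      · subst hx
        refine ⟨by simp, ?_⟩
        have h0 : P + y - (P + y - (s + y)) = s + y := by ring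
        simp only [h0]
        simp [PySem.Set.mem_add]
      · simp only [if_neg hx]
        have h1 := (hinv x).1
        have h2 := (hinv x).2
        refine ⟨h1, ?_, ?_⟩
        · intro h
          rw [hbase]
          exact (PySem.Set.mem_add _ _ _).mpr (Or.inl (h2.mp h))
        · intro hmem
          rw [hbase] at hmem
          rcases (PySem.Set.mem_add _ _ _).mp hmem with hm | hm
          · exact h2.mpr hm
          · exfalso; apply hx; omega

-- ===== VERDICT (by name: the statement is the Claim_ definition above) =====
theorem maxNonOverlapping_spec : Claim_equal_maxNonOverlapping := by
  intro nums target _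
  show maxNonOverlapping nums target = maxNonOverlapping_alt nums target
  unfold maxNonOverlapping maxNonOverlapping_alt
  apply loop_eq target nums 0 (PySem.Set.ofList [0]) 0 0 _ le_rfl
  intro x
  rw [PySem.Dict.getD_insert]
  by_cases hx : x = 0
  · subst hx
    simp [PySem.Set.ofList]
  · simp only [if_neg hx]
    rw [PySem.Dict.getD_empty]
    refine ⟨by omega, by omega, ?_⟩
    intro hmem
    exfalso
    apply hx
    have : x - (0 - 0) ∈ PySem.Set.ofList [(0:Int)] := hmem
    simp [PySem.Set.ofList] at this
    omega
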